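-- pv_equiv track=rewrite | github.com/Afische/MayaToEagleTool | MayaToEagleTool.py | views_to_checkbox_payload
-- ===== SOURCE A (Python) =====
-- def views_to_checkbox_payload(views):
--     views_lower = {v.strip().lower() for v in (views or [])}
--     return {
--         'front': 'front' in views_lower,
--         'left':  'left'  in views_lower,
--         'back':  'back'  in views_lower,
--         'top':   'top'   in views_lower,
--     }
-- ===== SOURCE B (Python) =====
-- def views_to_checkbox_payload(views):
--     vs = views or []
--     return {k: any(v.strip().lower() == k for v in vs)
--             for k in ('front', 'left', 'back', 'top')}
-- ===== Notes on version B (the rewrite author's own statement) =====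
-- stated objective: alternative
-- what changed: B inverts the loop nesting: it iterates over the four output keys and for each key scans the raw input with a short-circuiting any(), instead of materializing a normalized set of all inputs and probing it four times.
import Mathlib
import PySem

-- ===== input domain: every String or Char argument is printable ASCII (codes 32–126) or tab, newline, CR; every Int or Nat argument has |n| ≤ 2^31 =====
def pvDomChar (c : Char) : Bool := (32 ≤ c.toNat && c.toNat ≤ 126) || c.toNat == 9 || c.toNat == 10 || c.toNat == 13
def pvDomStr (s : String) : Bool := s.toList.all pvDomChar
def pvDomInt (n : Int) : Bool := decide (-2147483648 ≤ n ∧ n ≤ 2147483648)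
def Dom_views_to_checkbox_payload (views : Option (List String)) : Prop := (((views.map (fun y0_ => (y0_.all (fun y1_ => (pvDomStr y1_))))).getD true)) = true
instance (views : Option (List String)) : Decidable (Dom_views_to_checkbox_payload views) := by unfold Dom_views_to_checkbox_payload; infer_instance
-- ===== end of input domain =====

-- B inverts the loop nesting: it iterates over the four output keys and, for each key,
-- scans the raw input with a short-circuiting any (objective: alternative; no intermediate set).

-- ===== PORT A =====
def views_to_checkbox_payload (views : Option (List String)) : List (String × Bool) :=
  let views_lower : PySem.Set String :=
    PySem.Set.ofList ((views.getD []).map (fun v => PySem.Str.lower (PySem.Str.strip v)))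
  [("front", PySem.Set.contains views_lower "front"),
   ("left",  PySem.Set.contains views_lower "left"),
   ("back",  PySem.Set.contains views_lower "back"),
   ("top",   PySem.Set.contains views_lower "top")]

-- ===== PORT B =====
def views_to_checkbox_payload_alt (views : Option (List String)) : List (String × Bool) :=
  let vs := views.getD []
  ["front", "left", "back", "top"].map
    (fun k => (k, vs.any (fun v => PySem.Str.lower (PySem.Str.strip v) == k)))

-- ===== PRECONDITION & SPEC =====
def Spec_views_to_checkbox_payload (views : Option (List String)) (out : List (String × Bool)) : Prop := out = views_to_checkbox_payload_alt views
instance (views : Option (List String)) (out : List (String × Bool)) : Decidable (Spec_views_to_checkbox_payload views out) := by unfold Spec_views_to_checkbox_payload; infer_instance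

-- ===== CLAIM (what is proved, stated in full; the proofs are below) =====
def Claim_equal_views_to_checkbox_payload : Prop := ∀ (views : Option (List String)), Dom_views_to_checkbox_payload views → Spec_views_to_checkbox_payload views (views_to_checkbox_payload views)

-- ===== LEMMAS AND PROOFS =====

-- membership in A's normalized set equals B's per-key scan of the raw input
theorem pv_contains_eq_any (l : List String) (k : String) :
    PySem.Set.contains (PySem.Set.ofList (l.map (fun v => PySem.Str.lower (PySem.Str.strip v)))) k
      = l.any (fun v => PySem.Str.lower (PySem.Str.strip v) == k) := by
  rw [Bool.eq_iff_iff]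
  simp only [PySem.Set.contains_eq_listContains, List.contains_eq_mem, PySem.Set.mem_ofList,
    List.mem_map, List.any_eq_true, beq_iff_eq, decide_eq_true_eq]

-- ===== VERDICT (by name: the statement is the Claim_ definition above) =====
theorem views_to_checkbox_payload_spec : Claim_equal_views_to_checkbox_payload := by
  intro views _
  unfold Spec_views_to_checkbox_payload views_to_checkbox_payload views_to_checkbox_payload_alt
  simp only [List.map, pv_contains_eq_any]
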